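-- pv_equiv track=rewrite | github.com/marcosbolanos/RLBind | src/plots/embedding_figure_pack/plot_embedding_tanimoto_precision.py | _map_index_by_complex_id
-- ===== SOURCE A (Python) =====
-- def _map_index_by_complex_id(
--     index_rows: list[dict[str, str]],
-- ) -> tuple[dict[str, int], int]:
--     mapping: dict[str, int] = {}
--     duplicates = 0
--     for idx, row in enumerate(index_rows):
--         complex_id = row.get("complex_id")
--         if not complex_id:
--             continue
--         if complex_id in mapping:
--             duplicates += 1
--             continue
--         mapping[complex_id] = idx
--     return mapping, duplicates
-- ===== SOURCE B (Python) =====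
-- def _map_index_by_complex_id(
--     index_rows: list[dict[str, str]],
-- ) -> tuple[dict[str, int], int]:
--     # Group-by pass: complex_id -> list of ALL row indices that carry it (truthy ids only).
--     groups: dict[str, list[int]] = {}
--     for idx, row in enumerate(index_rows):
--         cid = row.get("complex_id")
--         if cid:
--             groups.setdefault(cid, []).append(idx)
--     # Derive both outputs from the grouped multimap:
--     # the first occurrence represents each id, every extra occurrence is one duplicate.
--     mapping = {cid: positions[0] for cid, positions in groups.items()}
--     duplicates = sum(len(positions) - 1 for positions in groups.values())
--     return mapping, duplicates
-- ===== Notes on version B (the rewrite author's own statement) =====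
-- stated objective: alternative
-- what changed: B replaces A's first-wins dict with a duplicate counter by a different data structure: a group-by multimap recording ALL row indices per complex_id, from which the mapping (first index of each group) and the duplicate count (sum of group sizes minus one) are derived afterwards.
import Mathlib
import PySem

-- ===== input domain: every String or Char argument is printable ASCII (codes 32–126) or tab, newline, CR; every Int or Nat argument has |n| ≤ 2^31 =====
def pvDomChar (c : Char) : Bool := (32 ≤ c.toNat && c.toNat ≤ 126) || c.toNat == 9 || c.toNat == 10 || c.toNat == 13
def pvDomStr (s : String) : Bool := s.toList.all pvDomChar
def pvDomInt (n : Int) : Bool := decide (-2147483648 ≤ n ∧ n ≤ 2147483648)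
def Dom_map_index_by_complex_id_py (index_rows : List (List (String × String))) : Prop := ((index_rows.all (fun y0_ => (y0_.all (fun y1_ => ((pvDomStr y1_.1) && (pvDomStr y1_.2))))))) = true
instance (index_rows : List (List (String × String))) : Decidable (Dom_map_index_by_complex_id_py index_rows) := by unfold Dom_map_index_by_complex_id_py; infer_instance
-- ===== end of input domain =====

-- B replaces A's first-wins dict + duplicate counter by a group-by multimap (id -> all its row
-- indices), deriving the mapping and the duplicate count from the groups afterwards; objective:
-- alternative data structure, same cost.

-- shared helper: row.get("complex_id") on an association-list row (first match)
def rowGetCid (row : List (String × String)) : Option String :=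
  (PySem.Dict.mk row).get? "complex_id"

-- ===== PORT A =====
def mapACore : List (List (String × String)) → Int → PySem.Dict String Int → Int →
    PySem.Dict String Int × Int
  | [], _, mapping, dups => (mapping, dups)
  | row :: rest, idx, mapping, dups =>
    match rowGetCid row with
    | none => mapACore rest (idx + 1) mapping dups
    | some cid =>
      if cid = "" then mapACore rest (idx + 1) mapping dups
      else if mapping.contains cid then mapACore rest (idx + 1) mapping (dups + 1)
      else mapACore rest (idx + 1) (mapping.insert cid idx) dups

def map_index_by_complex_id_py (index_rows : List (List (String × String))) : (List (String × Int)) × Int :=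
  let r := mapACore index_rows 0 PySem.Dict.empty 0
  (r.1.items, r.2)

-- ===== PORT B =====
-- Source B's grouping loop: groups.setdefault(cid, []).append(idx) = modify cid [] (· ++ [idx])
def groupCids : List (List (String × String)) → Int → PySem.Dict String (List Int) →
    PySem.Dict String (List Int)
  | [], _, g => g
  | row :: rest, idx, g =>
    match rowGetCid row with
    | some cid =>
      if cid ≠ "" then groupCids rest (idx + 1) (g.modify cid [] (· ++ [idx]))
      else groupCids rest (idx + 1) g
    | none => groupCids rest (idx + 1) g

def map_index_by_complex_id_py_alt (index_rows : List (List (String × String))) : (List (String × Int)) × Int :=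
  let groups := groupCids index_rows 0 PySem.Dict.empty
  -- {cid: positions[0] for …}: every group is nonempty by construction, so positions[0] is headD 0 exactly
  let mapping := groups.items.foldl (fun d p => d.insert p.1 (p.2.headD 0)) PySem.Dict.empty
  let duplicates := (groups.values.map (fun l => (l.length : Int) - 1)).sum
  (mapping.items, duplicates)

-- ===== PRECONDITION & SPEC =====
def Spec_map_index_by_complex_id_py (index_rows : List (List (String × String))) (out : (List (String × Int)) × Int) : Prop := out = map_index_by_complex_id_py_alt index_rows
instance (index_rows : List (List (String × String))) (out : (List (String × Int)) × Int) : Decidable (Spec_map_index_by_complex_id_py index_rows out) := by unfold Spec_map_index_by_complex_id_py; infer_instance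

-- ===== CLAIM (what is proved, stated in full; the proofs are below) =====
def Claim_equal_map_index_by_complex_id_py : Prop := ∀ (index_rows : List (List (String × String))), Dom_map_index_by_complex_id_py index_rows → Spec_map_index_by_complex_id_py index_rows (map_index_by_complex_id_py index_rows)

-- ===== LEMMAS AND PROOFS =====

-- duplicates as B computes them from a group dict
def dupSum (g : PySem.Dict String (List Int)) : Int :=
  (g.values.map (fun l => (l.length : Int) - 1)).sum

-- the view A maintains directly: first element of each group
def firstOf (p : String × List Int) : String × Int := (p.1, p.2.headD 0)

theorem tail_upd_id (l' : List (String × List Int)) (cid : String) (old : List Int) (idx : Int)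
    (h : ¬∃ a ∈ l', a.1 = cid) :
    l'.map (fun p => if (p.1 == cid) = true then (cid, old ++ [idx]) else p) = l' := by
  conv_rhs => rw [← List.map_id l']
  apply List.map_congr_left
  intro p hp
  have : p.1 ≠ cid := fun hc => h ⟨p, hp, hc⟩
  simp [this]

theorem sum_upd (l : List (String × List Int)) (cid : String) (old : List Int) (idx : Int)
    (hnd : (l.map Prod.fst).Nodup) (hmem : (cid, old) ∈ l) :
    ((l.map (fun p => if (p.1 == cid) = true then (cid, old ++ [idx]) else p)).map
        (fun p => ((p.2.length : Int) - 1))).sum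
      = ((l.map (fun p => ((p.2.length : Int) - 1))).sum) + 1 := by
  induction l with
  | nil => cases hmem
  | cons q l' ih =>
    simp only [List.map_cons, List.nodup_cons, List.mem_map] at hnd
    by_cases hq : (q.1 == cid) = true
    · have hq' : q.1 = cid := by simpa using hq
      have hv : q.2 = old := by
        rcases List.mem_cons.mp hmem with h | h
        · rw [← h]
        · exact absurd ⟨(cid, old), h, by rw [← hq']⟩ hnd.1
      rw [List.map_cons, if_pos hq, tail_upd_id l' cid old idx (by rw [← hq']; exact hnd.1)]
      simp only [List.map_cons, List.sum_cons, hv, List.length_append, List.length_cons,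
        List.length_nil]
      push_cast
      ring
    · have hmem' : (cid, old) ∈ l' := by
        rcases List.mem_cons.mp hmem with h | h
        · exact absurd (by rw [← h]; simp) hq
        · exact h
      rw [List.map_cons, if_neg hq]
      simp only [List.map_cons, List.sum_cons, ih hnd.2 hmem']
      ring

theorem map_upd (l : List (String × List Int)) (cid : String) (old : List Int) (idx : Int)
    (hnd : (l.map Prod.fst).Nodup) (hmem : (cid, old) ∈ l) (hne : old ≠ []) :
    (l.map (fun p => if (p.1 == cid) = true then (cid, old ++ [idx]) else p)).map firstOf
      = l.map firstOf := by
  induction l with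
  | nil => rfl
  | cons q l' ih =>
    simp only [List.map_cons, List.nodup_cons, List.mem_map] at hnd
    by_cases hq : (q.1 == cid) = true
    · have hq' : q.1 = cid := by simpa using hq
      have hv : q.2 = old := by
        rcases List.mem_cons.mp hmem with h | h
        · rw [← h]
        · exact absurd ⟨(cid, old), h, by rw [← hq']⟩ hnd.1
      rw [List.map_cons, if_pos hq, tail_upd_id l' cid old idx (by rw [← hq']; exact hnd.1)]
      simp only [List.map_cons]
      congr 1
      obtain ⟨o, os, rfl⟩ : ∃ o os, old = o :: os := by
        cases old with
        | nil => exact absurd rfl hne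
        | cons o os => exact ⟨o, os, rfl⟩
      simp [firstOf, hq', hv]
    · have hmem' : (cid, old) ∈ l' := by
        rcases List.mem_cons.mp hmem with h | h
        · exact absurd (by rw [← h]; simp) hq
        · exact h
      rw [List.map_cons, if_neg hq]
      simp only [List.map_cons, ih hnd.2 hmem']

-- main invariant: A's running (mapping, dups) is the first-element view of B's running groups
theorem core_eq (rows : List (List (String × String))) (idx : Int)
    (m : PySem.Dict String Int) (d : Int) (g : PySem.Dict String (List Int))
    (hnd : g.keys.Nodup)
    (h1 : m.items = g.items.map firstOf)
    (h2 : ∀ k, m.contains k = g.contains k)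
    (h3 : ∀ p ∈ g.items, p.2 ≠ []) :
    (mapACore rows idx m d).1.items = (groupCids rows idx g).items.map firstOf
      ∧ (mapACore rows idx m d).2 = d + dupSum (groupCids rows idx g) - dupSum g := by
  induction rows generalizing idx m d g with
  | nil => exact ⟨h1, by simp [mapACore, groupCids]⟩
  | cons row rest ih =>
    simp only [mapACore, groupCids]
    cases hr : rowGetCid row with
    | none => exact ih _ _ _ _ hnd h1 h2 h3
    | some cid =>
      dsimp only
      by_cases hc : cid = ""
      · rw [if_pos hc, if_neg (not_not_intro hc)]
        exact ih _ _ _ _ hnd h1 h2 h3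
      · rw [if_neg hc, if_pos hc]
        simp only [PySem.Dict.modify]
        by_cases hm : g.contains cid
        · -- duplicate occurrence: A counts 1, B appends idx to the existing group
          have hmc : m.contains cid = true := by rw [h2]; exact hm
          rw [if_pos hmc]
          set old := g.getD cid [] with hold
          have hget : g.get? cid = some old := by
            have : (g.get? cid).isSome := by
              rw [← PySem.Dict.contains_eq_isSome_get?]; exact hm
            rcases Option.isSome_iff_exists.mp this with ⟨v, hv⟩
            simp [hold, PySem.Dict.getD_eq_get?_getD, hv]
          have hmem : (cid, old) ∈ g.items :=
            (PySem.Dict.get?_eq_some_iff_mem_items g cid old hnd).mp hget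
          have hne : old ≠ [] := h3 _ hmem
          have hitems := PySem.Dict.items_insert_of_contains g (old ++ [idx]) hm
          have hnd' : (g.insert cid (old ++ [idx])).keys.Nodup :=
            PySem.Dict.nodup_keys_insert _ _ _ hnd
          have h1' : m.items = (g.insert cid (old ++ [idx])).items.map firstOf := by
            rw [hitems, map_upd _ _ _ _ (by simpa [PySem.Dict.keys] using hnd) hmem hne, h1]
          have h2' : ∀ k, m.contains k = (g.insert cid (old ++ [idx])).contains k := by
            intro k
            rw [PySem.Dict.contains_insert, h2 k]
            by_cases hk : k = cid
            · simp [hk, hm]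
            · simp [hk]
          have h3' : ∀ p ∈ (g.insert cid (old ++ [idx])).items, p.2 ≠ [] := by
            intro p hp
            rcases (PySem.Dict.mem_items_insert _ _ _ _).mp hp with h | h
            · subst h; simp
            · exact h3 _ h.1
          obtain ⟨ha, hb⟩ := ih (idx + 1) m (d + 1) _ hnd' h1' h2' h3'
          refine ⟨ha, ?_⟩
          have hdup : dupSum (g.insert cid (old ++ [idx])) = dupSum g + 1 := by
            unfold dupSum
            simp only [PySem.Dict.values, hitems, List.map_map]
            have := sum_upd g.items cid old idx (by simpa [PySem.Dict.keys] using hnd) hmem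
            simpa [List.map_map, Function.comp] using this
          rw [hb, hdup]
          ring
        · -- first occurrence: A inserts idx, B starts the group [idx]
          have hm' : g.contains cid = false := by simpa using hm
          have hmc : ¬ m.contains cid = true := by rw [h2 cid, hm']; simp
          rw [if_neg hmc]
          have hold : g.getD cid [] ++ [idx] = [idx] := by
            rw [PySem.Dict.getD_of_not_contains g [] hm']
            rfl
          rw [hold]
          have hitems := PySem.Dict.items_insert_of_not_contains g ([idx] : List Int) hm'
          have hnd' : (g.insert cid [idx]).keys.Nodup :=
            PySem.Dict.nodup_keys_insert _ _ _ hnd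
          have h1' : (m.insert cid idx).items = (g.insert cid [idx]).items.map firstOf := by
            rw [PySem.Dict.items_insert_of_not_contains m idx (by rw [h2 cid]; exact hm'), hitems]
            simp [h1, firstOf]
          have h2' : ∀ k, (m.insert cid idx).contains k = (g.insert cid [idx]).contains k := by
            intro k
            rw [PySem.Dict.contains_insert, PySem.Dict.contains_insert, h2 k]
          have h3' : ∀ p ∈ (g.insert cid [idx]).items, p.2 ≠ [] := by
            intro p hp
            rcases (PySem.Dict.mem_items_insert _ _ _ _).mp hp with h | h
            · subst h; simp
            · exact h3 _ h.1
          obtain ⟨ha, hb⟩ := ih (idx + 1) (m.insert cid idx) d _ hnd' h1' h2' h3'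
          refine ⟨ha, ?_⟩
          have hdup : dupSum (g.insert cid [idx]) = dupSum g := by
            unfold dupSum
            simp [PySem.Dict.values, hitems]
          rw [hb, hdup]

-- the groups dict keeps its keys unique throughout
theorem groupCids_nodup (rows : List (List (String × String))) (idx : Int)
    (g : PySem.Dict String (List Int)) (h : g.keys.Nodup) :
    (groupCids rows idx g).keys.Nodup := by
  induction rows generalizing idx g with
  | nil => exact h
  | cons row rest ih =>
    simp only [groupCids]
    cases rowGetCid row with
    | none => exact ih _ _ h
    | some cid =>
      dsimp only
      by_cases hc : cid = ""
      · rw [if_neg (not_not_intro hc)]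
        exact ih _ _ h
      · rw [if_pos hc]
        simp only [PySem.Dict.modify]
        exact ih _ _ (PySem.Dict.nodup_keys_insert _ _ _ h)

-- ===== VERDICT (by name: the statement is the Claim_ definition above) =====
theorem map_index_by_complex_id_py_spec : Claim_equal_map_index_by_complex_id_py := by
  intro index_rows _
  unfold Spec_map_index_by_complex_id_py
  obtain ⟨ha, hb⟩ := core_eq index_rows 0 PySem.Dict.empty 0 PySem.Dict.empty
    PySem.Dict.nodup_keys_empty (by simp [PySem.Dict.empty]) (by simp) (by simp [PySem.Dict.empty])
  have hgnd : (groupCids index_rows 0 PySem.Dict.empty).keys.Nodup :=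
    groupCids_nodup index_rows 0 PySem.Dict.empty PySem.Dict.nodup_keys_empty
  have hfresh := PySem.Dict.items_foldl_insert_fresh
    (groupCids index_rows 0 PySem.Dict.empty).items (fun p => p.1) (fun p => p.2.headD 0)
    PySem.Dict.empty (fun a _ => PySem.Dict.contains_empty a.1)
    (by simpa [PySem.Dict.keys] using hgnd)
  simp only [map_index_by_complex_id_py, map_index_by_complex_id_py_alt]
  refine Prod.ext ?_ ?_
  · simp only [ha]
    simp only [hfresh]
    simp [firstOf, List.headD_eq_head?_getD, PySem.Dict.empty]
  · simp only [hb]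
    simp [dupSum, PySem.Dict.empty, PySem.Dict.values]
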